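-- pv_equiv track=rewrite | github.com/AmyL19/PCC-Coding-Camp | 2020/advanced/double_advanced/3_sat.py | evaluate3sat
-- ===== SOURCE A (Python) =====
-- def evaluate3sat(args, statements):
--     def propToArg(s): return not args[int(s[1])] if s[0] == "~" else args[int(s[0])]
--
--     def statementTo3Sat(statement):
--         if len(statement) < 2:
--             return propToArg(statement[0])
--         else:
--             if statement[1] == "&":
--                 return propToArg(statement[0]) and statementTo3Sat(statement[2:])
--             else:
--                 assert(statement[1] == "|")
--                 return propToArg(statement[0]) or statementTo3Sat(statement[2:])
--
--     return statementTo3Sat(statements[0]) and evaluate3sat(args, statements[1:]) if len(statements) >= 1 else True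
-- ===== SOURCE B (Python) =====
-- def evaluate3sat(args, statements):
--     # Iterative: index loop over each statement with early break (same left-to-right
--     # short-circuit as Python's and/or), early-return loop over statements.
--     def literal(tok):
--         if tok[0] == "~":
--             return not args[int(tok[1])]
--         return args[int(tok[0])]
--
--     for st in statements:
--         i = 0
--         while True:
--             v = literal(st[i])
--             if i + 1 >= len(st):
--                 break
--             op = st[i + 1]
--             assert op in ("&", "|")
--             if op == "&" and not v:
--                 break
--             if op == "|" and v:
--                 break
--             i += 2
--         if not v:
--             return False
--     return True
-- ===== Notes on version B (the rewrite author's own statement) =====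
-- stated objective: alternative
-- what changed: A folds over statements by outer self-recursion and evaluates each statement by front-to-back self-recursion on sliced copies (statement[2:]); B is iterative: an index loop with early break per statement (same left-to-right short-circuit, no slicing) inside an early-return loop over statements.
-- outside the precondition, e.g. on evaluate3sat([True], [['0', '|', 'x']]): A returns True, B returns True
import Mathlib
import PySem

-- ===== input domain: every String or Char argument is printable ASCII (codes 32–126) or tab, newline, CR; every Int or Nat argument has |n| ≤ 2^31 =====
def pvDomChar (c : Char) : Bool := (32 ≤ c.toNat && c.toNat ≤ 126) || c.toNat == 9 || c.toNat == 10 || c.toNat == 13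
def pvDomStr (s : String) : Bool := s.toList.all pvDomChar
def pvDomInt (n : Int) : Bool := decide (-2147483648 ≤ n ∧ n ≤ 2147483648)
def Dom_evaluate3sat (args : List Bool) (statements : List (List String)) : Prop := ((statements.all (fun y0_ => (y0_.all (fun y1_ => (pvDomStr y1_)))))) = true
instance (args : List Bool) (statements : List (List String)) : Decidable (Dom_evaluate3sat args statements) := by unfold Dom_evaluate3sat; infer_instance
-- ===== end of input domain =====

-- B replaces A's two self-recursions (outer over statements[1:], inner over statement[2:]
-- slices) by iterative index loops with early exit, keeping A's left-to-right short-circuit.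

-- ===== PORT A =====
-- propToArg(s): not args[int(s[1])] if s[0] == "~" else args[int(s[0])].
-- Exact on Pre_ (token nonempty, the inspected char a digit, index in range);
-- where Python raises (IndexError/ValueError), Pre_ excludes the input.
def propToArgA (args : List Bool) (s : String) : Bool :=
  match s.toList with
  | [] => false                                        -- Python: IndexError (outside Pre_)
  | c :: rest =>
      if c = '~' then
        match rest with
        | [] => false                                  -- Python: IndexError (outside Pre_)
        | c2 :: _ => !(args.getD (c2.toNat - 48) false)  -- not args[int(s[1])]
      else args.getD (c.toNat - 48) false              -- args[int(s[0])]

-- statementTo3Sat, the front-to-back self-recursion with Python's and/or short-circuit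
def stmtA (args : List Bool) : List String → Bool
  | [] => false                                        -- Python: IndexError (outside Pre_)
  | [p] => propToArgA args p
  | p :: op :: rest =>
      if op == "&" then propToArgA args p && stmtA args rest
      else propToArgA args p || stmtA args rest        -- assert op == "|" (holds on Pre_)

def evaluate3sat (args : List Bool) (statements : List (List String)) : Bool :=
  match statements with
  | [] => true
  | s :: rest => stmtA args s && evaluate3sat args rest

-- ===== PORT B =====
-- literal(tok) of Source B; raising paths (tok empty / non-digit / index out of range)
-- are outside Pre_ and return a default here
def litB (args : List Bool) (tok : String) : Bool :=
  match tok.toList with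
  | [] => false                                        -- Python: IndexError (outside Pre_)
  | c :: rest =>
      if c = '~' then !(args.getD ((rest.getD 0 ' ').toNat - 48) false)
      else args.getD (c.toNat - 48) false

-- the 'while True' of Source B over index i (break → return the current v)
def stmtLoopB (args : List Bool) (st : List String) (i : Nat) : Bool :=
  let v := litB args (st.getD i "")                    -- v = literal(st[i])
  if st.length ≤ i + 1 then v                          -- if i + 1 >= len(st): break
  else
    let op := st.getD (i + 1) ""
    if op == "&" then (if v then stmtLoopB args st (i + 2) else v)
    else if op == "|" then (if v then v else stmtLoopB args st (i + 2))
    else v                                             -- Python: AssertionError (outside Pre_)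
termination_by st.length - i

-- the 'for st in statements' loop with its early 'return False'
def evaluate3sat_alt (args : List Bool) (statements : List (List String)) : Bool :=
  match statements with
  | [] => true
  | st :: rest => if stmtLoopB args st 0 then evaluate3sat_alt args rest else false

-- ===== PRECONDITION & SPEC =====
-- well-formed prop token: '~' then a digit, or a digit; the indexed variable exists
def propOk (args : List Bool) (s : String) : Bool :=
  match s.toList with
  | [] => false
  | c :: rest =>
      if c = '~' then
        match rest with
        | [] => false
        | c2 :: _ => c2.isDigit && decide (c2.toNat - 48 < args.length)
      else c.isDigit && decide (c.toNat - 48 < args.length)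

-- Pre_ excludes inputs on which evaluation raises (empty statement, non-digit or
-- out-of-range variable token, operator other than & / |).  Because which tokens A
-- reaches depends on the evaluated truth values, Pre_ conservatively requires EVERY
-- token to be well-formed, and thereby also excludes some inputs where A returns only
-- because short-circuit skips a malformed tail — B short-circuits identically and
-- returns the same value there (see claim.json cites).
def Pre_evaluate3sat (args : List Bool) (statements : List (List String)) : Prop :=
  ∀ st ∈ statements, st.length % 2 = 1 ∧ ∀ i < st.length,
    if i % 2 = 0 then propOk args (st.getD i "") = true
    else st.getD i "" = "&" ∨ st.getD i "" = "|"
instance (args : List Bool) (statements : List (List String)) : Decidable (Pre_evaluate3sat args statements) := by unfold Pre_evaluate3sat; infer_instance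

def pvWitness_evaluate3sat : List Bool × List (List String) :=
  ([true, false], [["0", "|", "~1"], ["~1", "&", "0"]])

def Spec_evaluate3sat (args : List Bool) (statements : List (List String)) (out : Bool) : Prop := out = evaluate3sat_alt args statements
instance (args : List Bool) (statements : List (List String)) (out : Bool) : Decidable (Spec_evaluate3sat args statements out) := by unfold Spec_evaluate3sat; infer_instance

-- ===== CLAIM (what is proved, stated in full; the proofs are below) =====
def Claim_equal_evaluate3sat : Prop := ∀ (args : List Bool) (statements : List (List String)), Dom_evaluate3sat args statements → Pre_evaluate3sat args statements → Spec_evaluate3sat args statements (evaluate3sat args statements)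

-- ===== LEMMAS AND PROOFS =====

theorem pvWitness_ok :
    Dom_evaluate3sat pvWitness_evaluate3sat.1 pvWitness_evaluate3sat.2 ∧
    Pre_evaluate3sat pvWitness_evaluate3sat.1 pvWitness_evaluate3sat.2 := by
  constructor <;> decide

-- proof-side regrouping of Pre_'s positional shape condition: prop (op prop)*
def stmtOk (args : List Bool) : List String → Bool
  | [] => false
  | [p] => propOk args p
  | p :: op :: rest => propOk args p && (op == "&" || op == "|") && stmtOk args rest

theorem shape_stmtOk (args : List Bool) : ∀ st : List String,
    (st.length % 2 = 1 ∧ ∀ i < st.length,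
      if i % 2 = 0 then propOk args (st.getD i "") = true
      else st.getD i "" = "&" ∨ st.getD i "" = "|") → stmtOk args st = true
  | [], h => by simp at h
  | [p], h => by
      have := h.2 0 (by simp)
      simpa [stmtOk] using this
  | p :: op :: rest, h => by
      obtain ⟨hlen, hpos⟩ := h
      have h0 := hpos 0 (by simp)
      have h1 := hpos 1 (by simp)
      norm_num [List.getD] at h0 h1
      have hrest : stmtOk args rest = true := shape_stmtOk args rest (by
        constructor
        · simp only [List.length_cons] at hlen; omega
        · intro i hi
          have := hpos (i + 2) (by simp only [List.length_cons]; omega)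
          have hmod : (i + 2) % 2 = i % 2 := by omega
          simpa [List.getD, hmod] using this)
      simp only [stmtOk, Bool.and_eq_true, Bool.or_eq_true, beq_iff_eq]
      exact ⟨⟨h0, h1⟩, hrest⟩

theorem prop_eq (args : List Bool) (s : String) (h : propOk args s = true) :
    propToArgA args s = litB args s := by
  rcases hs : s.toList with _ | ⟨c, rest⟩
  · simp [propOk, hs] at h
  · by_cases hc : c = '~'
    · subst hc
      rcases rest with _ | ⟨c2, r2⟩
      · simp [propOk, hs] at h
      · simp [propToArgA, litB, hs]
    · simp [propToArgA, litB, hs, hc]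

-- head / second / drop of st at index i, in terms of List.getD
theorem getD_of_drop (st : List String) (i : Nat) (hd : String) (tl : List String)
    (h : st.drop i = hd :: tl) : st.getD i "" = hd := by
  have h0 : (st.drop i)[0]? = some hd := by rw [h]; rfl
  rw [List.getElem?_drop] at h0
  simp [List.getD] at h0 ⊢
  simp [h0]

-- B's loop from index i computes A's recursion on the remaining tokens
theorem loop_eq (args : List Bool) (st : List String) : ∀ i,
    stmtOk args (st.drop i) = true → stmtA args (st.drop i) = stmtLoopB args st i := by
  intro i
  induction hn : st.length - i using Nat.strong_induction_on generalizing i with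
  | _ n ih =>
  intro hok
  subst hn
  rcases hdrop : st.drop i with _ | ⟨p, rest⟩ <;> rw [hdrop] at hok
  · simp [stmtOk] at hok
  · have hp : st.getD i "" = p := getD_of_drop st i p rest hdrop
    have hlen : st.length - i = rest.length + 1 := by
      have := congrArg List.length hdrop
      simp at this; omega
    rcases rest with _ | ⟨op, rest2⟩
    · -- single prop: the loop breaks immediately with v
      simp only [List.length_nil] at hlen
      rw [stmtLoopB]
      simp only [hp, if_pos (by omega : st.length ≤ i + 1)]
      exact prop_eq args p (by simpa [stmtOk] using hok)
    · -- p :: op :: rest2: evaluate v, test op, possibly continue at i + 2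
      have hop : st.getD (i + 1) "" = op := by
        apply getD_of_drop st (i + 1) op rest2
        have h1 : st.drop (i + 1) = (st.drop i).drop 1 := by
          rw [List.drop_drop]
        rw [h1, hdrop]; rfl
      have hrest2 : st.drop (i + 2) = rest2 := by
        have h2 : st.drop (i + 2) = (st.drop i).drop 2 := by rw [List.drop_drop]
        rw [h2, hdrop]; rfl
      simp only [stmtOk, Bool.and_eq_true, Bool.or_eq_true, beq_iff_eq] at hok
      obtain ⟨⟨hpok, hopok⟩, hrok⟩ := hok
      have hnle : ¬ st.length ≤ i + 1 := by
        simp only [List.length_cons] at hlen; omega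
      have ihr : stmtA args rest2 = stmtLoopB args st (i + 2) := by
        have := ih (st.length - (i + 2))
          (by simp only [List.length_cons] at hlen; omega) (i + 2) rfl
        rw [hrest2] at this
        exact this hrok
      rw [stmtLoopB]
      simp only [hp, hop, if_neg hnle]
      show (if op == "&" then propToArgA args p && stmtA args rest2
            else propToArgA args p || stmtA args rest2) = _
      rw [prop_eq args p hpok, ihr]
      rcases hopok with h | h <;> subst h <;> cases litB args p <;> simp

-- ===== VERDICT (by name: the statement is the Claim_ definition above) =====
theorem eval_eq (args : List Bool) (statements : List (List String))
    (hpre : Pre_evaluate3sat args statements) :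
    evaluate3sat args statements = evaluate3sat_alt args statements := by
  induction statements with
  | nil => rfl
  | cons s rest ih =>
      have hs : stmtOk args s = true := shape_stmtOk args s (hpre s (by simp))
      have hrest : Pre_evaluate3sat args rest := fun st hst => hpre st (by simp [hst])
      have hstmt : stmtA args s = stmtLoopB args s 0 := by
        have := loop_eq args s 0 (by simpa using hs)
        simpa using this
      simp only [evaluate3sat, evaluate3sat_alt]
      rw [hstmt, ih hrest]
      cases stmtLoopB args s 0 <;> simp

theorem evaluate3sat_spec : Claim_equal_evaluate3sat := by
  intro args statements _ hpre
  exact eval_eq args statements hpre
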